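-- pv_equiv track=rewrite | github.com/ankithpatlolla/cp_problems | 06-replace-Python/replace.py | fun_replace
-- ===== SOURCE A (Python) =====
-- def fun_replace(s1, s2, s3):
--     res = ""
--     for i in range(len(s1)):
--         check = s1[i]
--         j = i + 1
--         while j < len(s1):
--             check += s1[j]
--             if len(check) == len(s2):
--                 break
--             j += 1
--         if check == s2:
--             res += s1[:i] + s3 + s1[j + 1:]
--             return res
-- ===== SOURCE B (Python) =====
-- def fun_replace(s1, s2, s3):
--     i = s1.find(s2)
--     if i == -1:
--         return None
--     return s1[:i] + s3 + s1[i + len(s2):]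
-- ===== Notes on version B (the rewrite author's own statement) =====
-- stated objective: faster
-- what changed: B replaces A's per-index rebuild of a length-m window (nested loops, O(n*m)) with a single str.find for the first occurrence followed by one splice.
-- intended difference: On s2 of length <= 1 A is wrong for a first-occurrence replace: for empty s2 A returns None, and for a single-char s2 occurring before s1's last position A ignores every occurrence except possibly the last one (returning None or replacing the last); B returns the intended first-occurrence replacement (s3+s1 for empty s2). — e.g. on fun_replace("ab", "a", "x"): A returns none, B returns some "xb"
import Mathlib
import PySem

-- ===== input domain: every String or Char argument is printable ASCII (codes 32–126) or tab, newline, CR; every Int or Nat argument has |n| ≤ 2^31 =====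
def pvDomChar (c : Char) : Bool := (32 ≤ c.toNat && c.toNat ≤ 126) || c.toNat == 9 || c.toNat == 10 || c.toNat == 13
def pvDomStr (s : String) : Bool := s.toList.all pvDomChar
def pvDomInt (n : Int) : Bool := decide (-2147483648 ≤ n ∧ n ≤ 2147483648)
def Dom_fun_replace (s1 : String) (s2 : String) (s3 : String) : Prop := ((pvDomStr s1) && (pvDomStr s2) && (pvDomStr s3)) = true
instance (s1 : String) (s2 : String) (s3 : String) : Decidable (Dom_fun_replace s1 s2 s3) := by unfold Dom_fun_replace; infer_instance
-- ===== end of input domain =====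

-- B replaces A's per-index rebuild of a length-m window (nested loops) with one first-occurrence
-- search (str.find) plus a splice; on patterns of length ≤ 1 A is wrong and B differs (see D_ below).

-- ===== PORT A =====
-- inner 'while j < len(s1): check += s1[j]; if len(check) == len(s2): break; j += 1'
def pvInnerA (l1 : List Char) (m : Nat) (check : List Char) (j : Nat) : List Char × Nat :=
  if h : j < l1.length then
    let check' := check ++ [l1[j]]
    if check'.length = m then (check', j)
    else pvInnerA l1 m check' (j + 1)
  else (check, j)
termination_by l1.length - j

-- outer 'for i in range(len(s1)): …' with the early return
def pvOuterA (l1 l2 l3 : List Char) (i : Nat) : Option (List Char) :=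
  if h : i < l1.length then
    let p := pvInnerA l1 l2.length [l1[i]] (i + 1)
    if p.1 = l2 then
      some (PySem.List.slice l1 none (some (i : Int)) ++ l3 ++
            PySem.List.slice l1 (some ((p.2 : Int) + 1)) none)
    else pvOuterA l1 l2 l3 (i + 1)
  else none
termination_by l1.length - i

def fun_replace (s1 : String) (s2 : String) (s3 : String) : Option String :=
  (pvOuterA s1.toList s2.toList s3.toList 0).map String.ofList

-- ===== PORT B =====
def fun_replace_alt (s1 : String) (s2 : String) (s3 : String) : Option String :=
  let l1 := s1.toList
  let i := PySem.Chars.find l1 s2.toList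
  if i = -1 then none
  else some (String.ofList (PySem.List.slice l1 none (some i) ++ s3.toList ++
             PySem.List.slice l1 (some (i + s2.toList.length)) none))

-- ===== PRECONDITION & SPEC =====
-- On s2 of length ≤ 1 A is wrong for a first-occurrence replace: for empty s2 A returns None, and
-- for a single-char s2 occurring before s1's last position A ignores every occurrence except possibly
-- the last one (returning None or replacing the last); B returns the intended first-occurrence
-- replacement (s3 ++ s1 for empty s2).
def D_fun_replace (s1 : String) (s2 : String) (s3 : String) : Prop :=
  s2.toList = [] ∨ s1.toList.dropLast.any (fun c => s2.toList == [c]) = true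
instance (s1 : String) (s2 : String) (s3 : String) : Decidable (D_fun_replace s1 s2 s3) := by
  unfold D_fun_replace; infer_instance

def Spec_fun_replace (s1 : String) (s2 : String) (s3 : String) (out : Option String) : Prop :=
  ¬ D_fun_replace s1 s2 s3 → out = fun_replace_alt s1 s2 s3
instance (s1 : String) (s2 : String) (s3 : String) (out : Option String) : Decidable (Spec_fun_replace s1 s2 s3 out) := by unfold Spec_fun_replace; infer_instance

def pvDiffWitness_fun_replace : String × String × String := ("ab", "a", "x")
def pvDiffWitnessOut_fun_replace : (Option String) × (Option String) := (none, some "xb")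

-- ===== CLAIM (what is proved, stated in full; the proofs are below) =====
def Claim_unchanged_fun_replace : Prop := ∀ (s1 : String) (s2 : String) (s3 : String), Dom_fun_replace s1 s2 s3 → Spec_fun_replace s1 s2 s3 (fun_replace s1 s2 s3)
def Claim_changed_fun_replace : Prop := Dom_fun_replace (pvDiffWitness_fun_replace.1) (pvDiffWitness_fun_replace.2.1) (pvDiffWitness_fun_replace.2.2) ∧ D_fun_replace (pvDiffWitness_fun_replace.1) (pvDiffWitness_fun_replace.2.1) (pvDiffWitness_fun_replace.2.2) ∧ fun_replace (pvDiffWitness_fun_replace.1) (pvDiffWitness_fun_replace.2.1) (pvDiffWitness_fun_replace.2.2) = pvDiffWitnessOut_fun_replace.1 ∧ fun_replace_alt (pvDiffWitness_fun_replace.1) (pvDiffWitness_fun_replace.2.1) (pvDiffWitness_fun_replace.2.2) = pvDiffWitnessOut_fun_replace.2 ∧ pvDiffWitnessOut_fun_replace.1 ≠ pvDiffWitnessOut_fun_replace.2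

-- ===== LEMMAS AND PROOFS =====

-- A's "match at i" condition: l2 is a prefix of l1.drop i and, when l2 is a single char, i is last.
def pvAmatch (l1 l2 : List Char) (i : Nat) : Prop :=
  l2 <+: l1.drop i ∧ (2 ≤ l2.length ∨ i + 1 = l1.length)

theorem pvInnerA_ge (l1 : List Char) (m : Nat) :
    ∀ j check, j ≤ l1.length → m ≤ check.length →
      pvInnerA l1 m check j = (check ++ l1.drop j, l1.length) := by
  intro j check hj hm
  induction hfuel : l1.length - j generalizing j check with
  | zero =>
    have hnj : ¬ j < l1.length := by omega
    have hje : j = l1.length := by omega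
    rw [pvInnerA]
    simp [hje, List.drop_length]
  | succ k ih =>
    have h : j < l1.length := by omega
    rw [pvInnerA]
    simp only [h, dif_pos]
    rw [if_neg (by simp; omega)]
    rw [ih (j+1) (check ++ [l1[j]'h]) (by omega) (by simp; omega) (by omega)]
    rw [List.append_assoc]
    congr 2
    exact List.singleton_append.trans (List.getElem_cons_drop h)

theorem pvInnerA_break (l1 : List Char) (m : Nat) :
    ∀ j check, check.length < m → j + (m - check.length) ≤ l1.length →
      pvInnerA l1 m check j =
        (check ++ (l1.drop j).take (m - check.length), j + (m - check.length) - 1) := by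
  intro j check hm hfit
  induction hfuel : m - check.length generalizing j check with
  | zero => omega
  | succ k ih =>
    have h : j < l1.length := by omega
    rw [pvInnerA]
    simp only [h, dif_pos]
    by_cases hb : check.length + 1 = m
    · rw [if_pos (by simp [hb])]
      have hk : k = 0 := by omega
      subst hk
      have ht : (l1.drop j).take 1 = [l1[j]'h] := by
        rw [← List.getElem_cons_drop h, List.take_succ_cons, List.take_zero]
      simp [ht]
    · rw [if_neg (by simp [hb])]
      rw [ih (j+1) (check ++ [l1[j]'h]) (by simp; omega) (by simp; omega) (by simp; omega)]
      have hdrop : (l1.drop j).take (k+1) = l1[j]'h :: (l1.drop (j+1)).take k := by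
        conv_lhs => rw [← List.getElem_cons_drop h, List.take_succ_cons]
      simp only [Prod.mk.injEq]
      refine ⟨?_, by omega⟩
      rw [hdrop, List.append_assoc]
      simp

theorem pvInnerA_nofit (l1 : List Char) (m : Nat) :
    ∀ j check, check.length < m → j ≤ l1.length → l1.length < j + (m - check.length) →
      pvInnerA l1 m check j = (check ++ l1.drop j, l1.length) := by
  intro j check hm hj hnofit
  induction hfuel : l1.length - j generalizing j check with
  | zero =>
    have hje : j = l1.length := by omega
    rw [pvInnerA]
    simp [hje, List.drop_length]
  | succ k ih =>
    have h : j < l1.length := by omega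
    rw [pvInnerA]
    simp only [h, dif_pos]
    rw [if_neg (by simp; omega)]
    rw [ih (j+1) (check ++ [l1[j]'h]) (by simp; omega) (by omega) (by simp; omega) (by omega)]
    rw [List.append_assoc]
    congr 2
    exact List.singleton_append.trans (List.getElem_cons_drop h)



theorem pvAmatch_lt (l1 l2 : List Char) (i : Nat) (hm : 1 ≤ l2.length)
    (h : pvAmatch l1 l2 i) : i + l2.length ≤ l1.length := by
  have := h.1.length_le
  simp [List.length_drop] at this
  omega

theorem pvTake_drop (l1 : List Char) (i : Nat) (h : i < l1.length) (m : Nat) (hm : 1 ≤ m) :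
    (l1.drop i).take m = l1[i]'h :: (l1.drop (i+1)).take (m-1) := by
  obtain ⟨k, rfl⟩ : ∃ k, m = k + 1 := ⟨m - 1, by omega⟩
  conv_lhs => rw [← List.getElem_cons_drop h, List.take_succ_cons]
  norm_num

theorem pvOuterA_step_match (l1 l2 l3 : List Char) (i : Nat) (hm : 1 ≤ l2.length)
    (h : pvAmatch l1 l2 i) :
    pvOuterA l1 l2 l3 i = some (l1.take i ++ l3 ++ l1.drop (i + l2.length)) := by
  have hle := pvAmatch_lt l1 l2 i hm h
  have hi : i < l1.length := by omega
  rw [pvOuterA]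
  simp only [hi, dif_pos]
  by_cases h2 : 2 ≤ l2.length
  · have hp := pvInnerA_break l1 l2.length (i+1) [l1[i]'hi] (by simp; omega) (by simp; omega)
    simp only [List.length_singleton] at hp
    rw [hp]
    dsimp only
    have hchk : [l1[i]'hi] ++ (l1.drop (i+1)).take (l2.length - 1) = l2 := by
      have hpre := h.1
      rw [List.prefix_iff_eq_take] at hpre
      rw [List.singleton_append, ← pvTake_drop l1 i hi l2.length hm, ← hpre]
    rw [if_pos hchk]
    rw [PySem.List.slice_to_natCast]
    have hc : ((i + 1 + (l2.length - 1) - 1 : Nat) : Int) + 1 = ((i + l2.length : Nat) : Int) := by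
      push_cast; omega
    rw [hc, PySem.List.slice_from_natCast]
  · have hm1 : l2.length = 1 := by omega
    have hlast : i + 1 = l1.length := by rcases h.2 with h2' | h2'; omega; exact h2'
    have hp := pvInnerA_ge l1 l2.length (i+1) [l1[i]'hi] (by omega) (by simp; omega)
    rw [hp]
    dsimp only
    have hd : l1.drop (i+1) = [] := List.drop_eq_nil_of_le (by omega)
    have hchk : [l1[i]'hi] ++ l1.drop (i+1) = l2 := by
      rw [hd, List.append_nil]
      have hpre := h.1
      rw [List.prefix_iff_eq_take, hm1, pvTake_drop l1 i hi 1 (by omega)] at hpre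
      simpa using hpre.symm
    rw [if_pos hchk]
    rw [PySem.List.slice_to_natCast]
    have hc : ((l1.length : Nat) : Int) + 1 = ((l1.length + 1 : Nat) : Int) := by push_cast; ring
    rw [hc, PySem.List.slice_from_natCast]
    rw [List.drop_eq_nil_of_le (by omega), List.drop_eq_nil_of_le (by omega)]

theorem pvOuterA_step_not (l1 l2 l3 : List Char) (i : Nat) (hm : 1 ≤ l2.length)
    (hi : i < l1.length) (h : ¬ pvAmatch l1 l2 i) :
    pvOuterA l1 l2 l3 i = pvOuterA l1 l2 l3 (i + 1) := by
  rw [pvOuterA]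
  simp only [hi, dif_pos]
  by_cases h2 : 2 ≤ l2.length
  · by_cases hfit : i + l2.length ≤ l1.length
    · have hp := pvInnerA_break l1 l2.length (i+1) [l1[i]'hi] (by simp; omega) (by simp; omega)
      simp only [List.length_singleton] at hp
      rw [hp]
      dsimp only
      rw [if_neg]
      intro hchk
      apply h
      refine ⟨?_, Or.inl h2⟩
      have hlen : ([l1[i]'hi] ++ (l1.drop (i+1)).take (l2.length - 1)).length = l2.length := by
        rw [hchk]
      rw [List.prefix_iff_eq_take, ← hchk, hlen]
      rw [pvTake_drop l1 i hi l2.length hm, List.singleton_append]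
    · have hp := pvInnerA_nofit l1 l2.length (i+1) [l1[i]'hi] (by simp; omega) (by omega) (by simp; omega)
      rw [hp]
      dsimp only
      rw [if_neg]
      intro hchk
      have := congrArg List.length hchk
      simp at this
      omega
  · have hm1 : l2.length = 1 := by omega
    have hp := pvInnerA_ge l1 l2.length (i+1) [l1[i]'hi] (by omega) (by simp; omega)
    rw [hp]
    dsimp only
    by_cases hlast : i + 1 = l1.length
    · rw [if_neg]
      intro hchk
      apply h
      refine ⟨?_, Or.inr hlast⟩
      have hd : l1.drop (i+1) = [] := List.drop_eq_nil_of_le (by omega)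
      rw [hd, List.append_nil] at hchk
      rw [← List.getElem_cons_drop hi, hd, ← hchk]
    · rw [if_neg]
      intro hchk
      have := congrArg List.length hchk
      simp at this
      omega

theorem pvOuterA_none (l1 l2 l3 : List Char) (hm : 1 ≤ l2.length) :
    ∀ i, (∀ k, i ≤ k → ¬ pvAmatch l1 l2 k) → pvOuterA l1 l2 l3 i = none := by
  intro i hno
  induction hfuel : l1.length - i generalizing i with
  | zero =>
    rw [pvOuterA]
    simp [show ¬ i < l1.length by omega]
  | succ k ih =>
    have hi : i < l1.length := by omega
    rw [pvOuterA_step_not l1 l2 l3 i hm hi (hno i le_rfl)]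
    exact ih (i+1) (fun k hk => hno k (by omega)) (by omega)

theorem pvOuterA_some (l1 l2 l3 : List Char) (hm : 1 ≤ l2.length) (i0 : Nat)
    (h0 : pvAmatch l1 l2 i0) :
    ∀ i, i ≤ i0 → (∀ k, i ≤ k → k < i0 → ¬ pvAmatch l1 l2 k) →
      pvOuterA l1 l2 l3 i = some (l1.take i0 ++ l3 ++ l1.drop (i0 + l2.length)) := by
  intro i hi hno
  induction hfuel : i0 - i generalizing i with
  | zero =>
    have : i = i0 := by omega
    subst this
    exact pvOuterA_step_match l1 l2 l3 i hm h0
  | succ k ih =>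
    have hilt : i < l1.length := by
      have := pvAmatch_lt l1 l2 i0 hm h0
      omega
    rw [pvOuterA_step_not l1 l2 l3 i hm hilt (hno i le_rfl (by omega))]
    exact ih (i+1) (by omega) (fun k hk1 hk2 => hno k (by omega) hk2) (by omega)


theorem fun_replace_agree (s1 s2 s3 : String) (hD : ¬ D_fun_replace s1 s2 s3) :
    fun_replace s1 s2 s3 = fun_replace_alt s1 s2 s3 := by
  unfold fun_replace fun_replace_alt D_fun_replace at *
  rw [not_or] at hD
  obtain ⟨hne, hany⟩ := hD
  set l1 := s1.toList with hl1
  set l2 := s2.toList with hl2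
  set l3 := s3.toList with hl3
  have hm : 1 ≤ l2.length := by
    rcases l2 with _ | ⟨a, t⟩
    · exact absurd rfl hne
    · simp
  have hno1 : ∀ c ∈ l1.dropLast, l2 ≠ [c] := by
    intro c hc hceq
    apply hany
    rw [List.any_eq_true]
    exact ⟨c, hc, by simp [hceq]⟩
  by_cases hinf : l2 <:+: l1
  · -- a first occurrence exists
    have hfind : 0 ≤ PySem.Chars.find l1 l2 := (PySem.Chars.find_nonneg_iff l1 l2).mpr hinf
    obtain ⟨hpre, hmin⟩ := PySem.Chars.find_spec (s := l1) (sub := l2) hfind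
    set f := (PySem.Chars.find l1 l2).toNat with hf
    have hfle : f + l2.length ≤ l1.length := by
      have := hpre.length_le
      simp [List.length_drop] at this
      omega
    have hmatch : pvAmatch l1 l2 f := by
      refine ⟨hpre, ?_⟩
      by_cases h2 : 2 ≤ l2.length
      · exact Or.inl h2
      · right
        have hm1 : l2.length = 1 := by omega
        obtain ⟨c, hc⟩ := List.length_eq_one_iff.mp hm1
        by_contra hne2
        apply hno1 c _ hc
        have hflt : f < l1.length := by omega
        have : c = l1[f]'hflt := by
          have := hpre
          rw [hc] at this
          rw [← List.getElem_cons_drop hflt] at this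
          exact (List.cons_prefix_cons.mp this).1
        rw [this]
        have hfd : f < l1.dropLast.length := by
          rw [List.length_dropLast]; omega
        have hgd := List.getElem_dropLast hfd
        rw [← hgd]
        exact List.getElem_mem hfd
    have hA := pvOuterA_some l1 l2 l3 hm f hmatch 0 (by omega)
      (fun k _ hk2 hmk => hmin k hk2 hmk.1)
    rw [hA]
    have hfi : PySem.Chars.find l1 l2 = (f : Int) := by rw [hf, Int.toNat_of_nonneg hfind]
    simp only [hfi]
    rw [if_neg (by omega)]
    rw [PySem.List.slice_to_natCast]
    have hc2 : ((f : Int) + (l2.length : Int)) = ((f + l2.length : Nat) : Int) := by push_cast; ring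
    rw [hc2, PySem.List.slice_from_natCast]
    simp
  · -- no occurrence at all
    have hfind : PySem.Chars.find l1 l2 = -1 := (PySem.Chars.find_eq_neg_one_iff l1 l2).mpr hinf
    have hA := pvOuterA_none l1 l2 l3 hm 0 (fun k _ hmk => by
      apply hinf
      exact hmk.1.isInfix.trans (l1.drop_suffix k).isInfix)
    rw [hA]
    simp [hfind]

-- ===== VERDICT (by name: the statement is the Claim_ definition above) =====
theorem fun_replace_spec : Claim_unchanged_fun_replace := by
  intro s1 s2 s3 _ hD
  exact fun_replace_agree s1 s2 s3 hD

set_option maxRecDepth 8192 in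
theorem fun_replace_changed : Claim_changed_fun_replace := by
  unfold Claim_changed_fun_replace
  refine ⟨by decide, by decide, ?_, by decide, by decide⟩
  show fun_replace "ab" "a" "x" = none
  simp [fun_replace, pvOuterA, pvInnerA]
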